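-- pv_equiv track=rewrite | github.com/rubab1991/todo-backend | src/utils/tags.py | normalise_tags
-- ===== SOURCE A (Python) =====
-- from typing import List, Optional
--
-- def normalise_tags(tags: Optional[List[str]]) -> List[str]:
--     """
--     Normalise a list of tag strings:
--     - Strip whitespace
--     - Lowercase
--     - Drop empty strings
--     - Truncate to 50 characters
--     - Deduplicate (preserve order of first occurrence)
--     - Limit to 20 tags
--     """
--     if not tags:
--         return []
--     seen = set()
--     result = []
--     for tag in tags:
--         normalised = tag.strip().lower()[:50]
--         if normalised and normalised not in seen:
--             seen.add(normalised)
--             result.append(normalised)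
--         if len(result) >= 20:
--             break
--     return result
-- ===== SOURCE B (Python) =====
-- from typing import List, Optional
--
-- def normalise_tags(tags: Optional[List[str]]) -> List[str]:
--     if not tags:
--         return []
--     rev = {}
--     for tag in reversed(tags):
--         head = tag.strip().lower()[:50]
--         if head:
--             rev.pop(head, None)   # move-to-end: drop any later (in reversed order) occurrence
--             rev[head] = 0
--     out = list(rev)
--     out.reverse()
--     return out[:20]
-- ===== Notes on version B (the rewrite author's own statement) =====
-- stated objective: alternative
-- what changed: Replaced the forward accumulate loop with a seen-set, conditional append and early break by a back-to-front scan: iterate the list reversed, move each cleaned tag to the end of a dict (pop then reinsert), then reverse the key order and slice to 20; keeping the LAST occurrence while scanning backwards is the first occurrence forwards, so no seen set or early break is needed.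
import Mathlib
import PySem

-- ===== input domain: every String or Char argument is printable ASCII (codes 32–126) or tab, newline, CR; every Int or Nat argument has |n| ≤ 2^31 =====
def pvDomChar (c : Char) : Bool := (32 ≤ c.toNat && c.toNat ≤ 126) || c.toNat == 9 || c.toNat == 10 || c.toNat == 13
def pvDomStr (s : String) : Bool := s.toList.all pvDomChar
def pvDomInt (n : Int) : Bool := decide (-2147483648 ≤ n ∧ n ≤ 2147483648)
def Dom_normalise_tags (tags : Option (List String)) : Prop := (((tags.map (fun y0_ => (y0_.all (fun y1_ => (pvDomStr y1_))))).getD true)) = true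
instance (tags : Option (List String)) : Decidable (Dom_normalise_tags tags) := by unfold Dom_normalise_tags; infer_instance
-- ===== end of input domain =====

-- B replaces A's forward seen-set loop with early break by a back-to-front scan with a move-to-end dict, reversed at the end (alternative; same result).

-- shared by both sources: tag.strip().lower()[:50]
def pvClean (t : String) : String :=
  PySem.Str.slice (PySem.Str.lower (PySem.Str.strip t)) none (some 50)

-- ===== PORT A =====
-- the for-loop of A: state = (seen, result), early break once 20 tags collected
def normalise_tags_loop : List String → PySem.Set String → List String → List String
  | [], _, result => result
  | t :: rest, seen, result =>
    let normalised := pvClean t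
    let seen' := if normalised ≠ "" ∧ normalised ∉ seen then seen.add normalised else seen
    let result' := if normalised ≠ "" ∧ normalised ∉ seen then result ++ [normalised] else result
    if 20 ≤ result'.length then result'
    else normalise_tags_loop rest seen' result'

def normalise_tags (tags : Option (List String)) : List String :=
  match tags with
  | none => []
  | some ts => if ts = [] then [] else normalise_tags_loop ts PySem.Set.empty []

-- ===== PORT B =====
-- one step of B's reversed loop: rev.pop(head, None); rev[head] = 0  (move the key to the end)
def pvRevStep (d : PySem.Dict String Int) (t : String) : PySem.Dict String Int :=
  let head := pvClean t
  if head = "" then d else (d.erase head).insert head 0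

def normalise_tags_alt (tags : Option (List String)) : List String :=
  match tags with
  | none => []
  | some ts =>
    if ts = [] then []
    else ((ts.reverse.foldl pvRevStep PySem.Dict.empty).keys.reverse).take 20

-- ===== PRECONDITION & SPEC =====
def Spec_normalise_tags (tags : Option (List String)) (out : List String) : Prop := out = normalise_tags_alt tags
instance (tags : Option (List String)) (out : List String) : Decidable (Spec_normalise_tags tags out) := by unfold Spec_normalise_tags; infer_instance

-- ===== CLAIM (what is proved, stated in full; the proofs are below) =====
def Claim_equal_normalise_tags : Prop := ∀ (tags : Option (List String)), Dom_normalise_tags tags → Spec_normalise_tags tags (normalise_tags tags)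

-- ===== LEMMAS AND PROOFS =====

-- proof helper: one back-to-front step as a pure list operation (B's dict keys, reversed)
def pvStep (t : String) (out : List String) : List String :=
  let head := pvClean t
  if head = "" then out else head :: out.filter (fun x => x ≠ head)

-- the new (non-empty, not-yet-seen) cleaned tags of ts, in order, relative to an already-seen list
def pvNewOnes (seen : List String) : List String → List String
  | [] => []
  | t :: ts =>
    let n := pvClean t
    if n ≠ "" ∧ n ∉ seen then n :: pvNewOnes (seen ++ [n]) ts
    else pvNewOnes seen ts

theorem pvLoop_eq (ts : List String) : ∀ (seen : PySem.Set String) (result : List String),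
    (∀ s, s ∈ seen ↔ s ∈ result) → result.length < 20 →
    normalise_tags_loop ts seen result = (result ++ pvNewOnes seen ts).take 20 := by
  induction ts with
  | nil =>
    intro seen result _ hlen
    simp [normalise_tags_loop, pvNewOnes, List.take_of_length_le (Nat.le_of_lt hlen)]
  | cons t ts ih =>
    intro seen result hmem hlen
    by_cases hk : pvClean t ≠ "" ∧ pvClean t ∉ seen
    · have hadd : seen.add (pvClean t) = seen ++ [pvClean t] := by
        simp [PySem.Set.add, hk.2]
      simp only [normalise_tags_loop, pvNewOnes, if_pos hk]
      by_cases hfull : 20 ≤ (result ++ [pvClean t]).length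
      · rw [if_pos hfull]
        have h20 : (result ++ [pvClean t]).length = 20 := by
          simp at hfull ⊢; omega
        rw [List.append_cons result (pvClean t) (pvNewOnes (seen ++ [pvClean t]) ts), List.take_left' h20]
      · rw [if_neg hfull]
        have hmem' : ∀ s, s ∈ seen.add (pvClean t) ↔ s ∈ result ++ [pvClean t] := by
          intro s
          rw [hadd]
          simp [hmem s]
        rw [ih (seen.add (pvClean t)) (result ++ [pvClean t]) hmem' (by simp at hfull ⊢; omega)]
        rw [hadd, List.append_assoc]
        rfl
    · simp only [normalise_tags_loop, pvNewOnes, if_neg hk]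
      rw [if_neg (by omega)]
      exact ih seen result hmem hlen

-- B's fold, filtered by a seen-list, is exactly A's stream of new tags
theorem pvNewOnes_eq_foldr (ts : List String) : ∀ (seen : List String),
    pvNewOnes seen ts = (ts.foldr pvStep []).filter (fun x => decide (x ∉ seen)) := by
  induction ts with
  | nil => intro seen; simp [pvNewOnes]
  | cons t ts ih =>
    intro seen
    by_cases hn : pvClean t = ""
    · have hk : ¬ (pvClean t ≠ "" ∧ pvClean t ∉ seen) := fun h => h.1 hn
      simp only [pvNewOnes, List.foldr_cons, pvStep, if_pos hn, if_neg hk]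
      exact ih seen
    · by_cases hs : pvClean t ∈ seen
      · have hns : ¬ (pvClean t ≠ "" ∧ pvClean t ∉ seen) := fun h => h.2 hs
        simp only [pvNewOnes, List.foldr_cons, pvStep, if_neg hn, if_neg hns]
        rw [ih seen]
        rw [List.filter_cons]
        rw [if_neg (by simp [hs])]
        rw [List.filter_filter]
        apply List.filter_congr
        intro x _
        by_cases hx : x = pvClean t <;> simp [hx, hs]
      · have hk : pvClean t ≠ "" ∧ pvClean t ∉ seen := ⟨hn, hs⟩
        simp only [pvNewOnes, List.foldr_cons, pvStep, if_neg hn, if_pos hk]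
        rw [ih (seen ++ [pvClean t])]
        rw [List.filter_cons]
        rw [if_pos (by simp [hs])]
        rw [List.filter_filter]
        congr 1
        apply List.filter_congr
        intro x _
        by_cases hx : x = pvClean t <;> simp [hx, hs]

theorem pvKeys_erase (d : PySem.Dict String Int) (k : String) :
    (d.erase k).keys = d.keys.filter (fun x => x ≠ k) := by
  simp [PySem.Dict.erase, PySem.Dict.keys, List.filter_map]
  congr 1

theorem pvContains_erase (d : PySem.Dict String Int) (k : String) :
    (d.erase k).contains k = false := by
  simp [PySem.Dict.erase, PySem.Dict.contains]

-- B's reversed dict loop produces exactly the reverse of the pvStep fold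
theorem pvRevLoop_keys (ts : List String) :
    (ts.reverse.foldl pvRevStep PySem.Dict.empty).keys = (ts.foldr pvStep []).reverse := by
  induction ts with
  | nil => simp [PySem.Dict.keys_empty]
  | cons t ts ih =>
    rw [List.reverse_cons, List.foldl_append, List.foldl_cons, List.foldl_nil]
    by_cases hn : pvClean t = ""
    · simpa [pvRevStep, pvStep, hn] using ih
    · simp only [pvRevStep, pvStep, if_neg hn, List.foldr_cons]
      rw [PySem.Dict.keys_insert_of_not_contains _ _ (pvContains_erase _ _),
          pvKeys_erase, ih, List.reverse_cons, ← List.filter_reverse]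

-- ===== VERDICT (by name: the statement is the Claim_ definition above) =====
theorem normalise_tags_spec : Claim_equal_normalise_tags := by
  intro tags _
  show normalise_tags tags = normalise_tags_alt tags
  match tags with
  | none => rfl
  | some ts =>
    by_cases h : ts = []
    · simp [normalise_tags, normalise_tags_alt, h]
    · rw [show normalise_tags (some ts) = normalise_tags_loop ts PySem.Set.empty []
            from by simp [normalise_tags, h],
          show normalise_tags_alt (some ts)
              = ((ts.reverse.foldl pvRevStep PySem.Dict.empty).keys.reverse).take 20
            from by simp [normalise_tags_alt, h]]
      rw [pvLoop_eq ts PySem.Set.empty [] (by simp [PySem.Set.empty]) (by simp)]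
      rw [List.nil_append]
      rw [show (PySem.Set.empty : PySem.Set String) = ([] : List String) from rfl]
      rw [pvNewOnes_eq_foldr ts [], pvRevLoop_keys, List.reverse_reverse]
      simp
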